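-- pv_equiv track=rewrite | github.com/Tulgaaaaaaaa/ctf | cyber-apocalypse-ctf-2025/crypto/kewiri/sol.py | elliptic_curve_order
-- ===== SOURCE A (Python) =====
-- def elliptic_curve_order(a, b, p):
--     curve_order = 0
--
--     for i in range(1, p):
--         x = pow(a, i, p)
--         y = pow(b, i, p)
--
--         curve_order += 1
--         if (x * y) % p == 0:
--             break
--     return curve_order
-- ===== SOURCE B (Python) =====
-- def elliptic_curve_order(a, b, p):
--     # O(log p): the loop's test (a^i * b^i) % p == 0 only depends on m = (a*b) % p,
--     # and if p divides m^i for some i >= 1 then it already divides m^cap for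
--     # cap = p.bit_length() (every prime-power exponent in p is below log2 p),
--     # so the first zero power, if any, appears within cap steps; otherwise the
--     # original loop runs to the end and returns p - 1.
--     if p <= 1:
--         return 0
--     m = (a * b) % p
--     if m == 0:
--         return 1
--     cap = p.bit_length()
--     t = m
--     i = 1
--     while i < cap and t != 0:
--         t = (t * m) % p
--         i += 1
--     return i if t == 0 else p - 1
-- ===== Notes on version B (the rewrite author's own statement) =====
-- stated objective: faster
-- what changed: Replaces the up-to-p-1-iteration loop of modular pows with an O(log p) loop: it tracks powers of m=(a*b)%p and stops after p.bit_length() steps, since p | m^i for some i>=1 implies p | m^bit_length(p); otherwise the answer is the closed form p-1.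
import Mathlib
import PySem

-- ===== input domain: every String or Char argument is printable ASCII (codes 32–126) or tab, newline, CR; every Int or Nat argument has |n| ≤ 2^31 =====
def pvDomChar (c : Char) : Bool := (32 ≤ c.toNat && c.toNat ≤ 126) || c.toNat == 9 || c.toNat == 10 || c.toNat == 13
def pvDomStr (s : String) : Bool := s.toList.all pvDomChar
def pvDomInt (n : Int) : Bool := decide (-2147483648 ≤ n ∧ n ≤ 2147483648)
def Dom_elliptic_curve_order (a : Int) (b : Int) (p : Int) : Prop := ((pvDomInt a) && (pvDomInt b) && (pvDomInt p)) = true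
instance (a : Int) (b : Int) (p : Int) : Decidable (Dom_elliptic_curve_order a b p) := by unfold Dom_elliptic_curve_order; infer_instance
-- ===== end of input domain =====

-- B replaces A's loop of up to p-1 modular pows by an O(log p) power-tracking loop
-- (plus the closed form p-1 when no power of (a*b)%p vanishes); return values agree
-- on all inputs, no side effects involved.

-- ===== PORT A =====
-- for i in range(1, p): x = pow(a,i,p); y = pow(b,i,p); curve_order += 1; if (x*y)%p == 0: break
-- range(1, p) is iterated lazily, as in Python: fuel = number of remaining values,
-- i = the current value of the range (so i ≥ 1 and i.toNat is the exact exponent)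
def pvALoop (a b p : Int) : Nat → Int → Int → Int
  | 0, _i, acc => acc
  | n+1, i, acc =>
    let x := PySem.Int.powMod a i.toNat p
    let y := PySem.Int.powMod b i.toNat p
    let acc' := acc + 1
    if PySem.Int.mod (x * y) p = 0 then acc' else pvALoop a b p n (i + 1) acc'

def elliptic_curve_order (a : Int) (b : Int) (p : Int) : Int :=
  pvALoop a b p (p - 1).toNat 1 0

-- ===== PORT B =====
-- while i < cap and t != 0: t = (t*m) % p; i += 1   (fuel = cap bounds the ≤ cap-1 iterations)
def pvBLoop (m p cap : Int) : Nat → Int → Int → Int × Int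
  | 0, t, i => (t, i)
  | fuel+1, t, i =>
    if i < cap ∧ t ≠ 0 then pvBLoop m p cap fuel (PySem.Int.mod (t * m) p) (i + 1) else (t, i)

def elliptic_curve_order_alt (a : Int) (b : Int) (p : Int) : Int :=
  if p ≤ 1 then 0
  else
    let m := PySem.Int.mod (a * b) p
    if m = 0 then 1
    else
      let cap : Nat := PySem.Int.bitLength p
      let r := pvBLoop m p (cap : Int) cap m 1
      if r.1 = 0 then r.2 else p - 1

-- ===== PRECONDITION & SPEC =====
def Spec_elliptic_curve_order (a : Int) (b : Int) (p : Int) (out : Int) : Prop := out = elliptic_curve_order_alt a b p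
instance (a : Int) (b : Int) (p : Int) (out : Int) : Decidable (Spec_elliptic_curve_order a b p out) := by unfold Spec_elliptic_curve_order; infer_instance

-- ===== CLAIM (what is proved, stated in full; the proofs are below) =====
def Claim_equal_elliptic_curve_order : Prop := ∀ (a : Int) (b : Int) (p : Int), Dom_elliptic_curve_order a b p → Spec_elliptic_curve_order a b p (elliptic_curve_order a b p)

-- ===== LEMMAS AND PROOFS =====

theorem pv_pow_dvd_of_pow_dvd (m p n i : ℕ) (hp : 2 ≤ p) (_hi : 1 ≤ i) (hn : 1 ≤ n)
    (hpn : p ≤ 2 ^ n) (hdvd : p ∣ m ^ i) : p ∣ m ^ n := by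
  by_cases hm : m = 0
  · subst hm; rw [zero_pow (by omega)]; exact dvd_zero p
  · have hp0 : p ≠ 0 := by omega
    have hmn : m ^ n ≠ 0 := pow_ne_zero n hm
    rw [← Nat.factorization_le_iff_dvd hp0 hmn]
    rw [Finsupp.le_iff]
    intro q hq
    rw [Nat.support_factorization] at hq
    have hqprime : q.Prime := Nat.prime_of_mem_primeFactors hq
    have hqp : q ∣ p := Nat.dvd_of_mem_primeFactors hq
    have hqm : q ∣ m := hqprime.dvd_of_dvd_pow (hqp.trans hdvd)
    have h1 : 0 < m.factorization q := hqprime.factorization_pos_of_dvd hm hqm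
    have he : p.factorization q ≤ n := by
      have h2 : q ^ p.factorization q ∣ p := Nat.ordProj_dvd p q
      have h3 : q ^ p.factorization q ≤ p := Nat.le_of_dvd (by omega) h2
      have h4 : 2 ^ p.factorization q ≤ q ^ p.factorization q :=
        Nat.pow_le_pow_left hqprime.two_le _
      exact (Nat.pow_le_pow_iff_right (by norm_num)).mp (le_trans h4 (le_trans h3 hpn))
    rw [Nat.factorization_pow]
    calc p.factorization q ≤ n := he
      _ ≤ n * m.factorization q := Nat.le_mul_of_pos_right n h1
    
theorem pv_pow_dvd_of_pow_dvd_int (a b p : Int) (n i : ℕ) (hp : 2 ≤ p) (hi : 1 ≤ i) (hn : 1 ≤ n)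
    (hpn : p ≤ 2 ^ n) (hdvd : p ∣ (a * b) ^ i) : p ∣ (a * b) ^ n := by
  rw [← Int.natAbs_dvd_natAbs] at hdvd ⊢
  rw [Int.natAbs_pow] at hdvd ⊢
  refine pv_pow_dvd_of_pow_dvd _ _ _ i (by omega) hi hn ?_ hdvd
  have hcast : ((2 : ℤ) ^ n) = ((2 ^ n : ℕ) : ℤ) := by push_cast; ring
  rw [hcast] at hpn
  omega

theorem pv_cond_A (a b p : Int) (hp : 0 < p) (k : ℕ) :
    PySem.Int.mod (PySem.Int.powMod a k p * PySem.Int.powMod b k p) p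
      = PySem.Int.mod ((a * b) ^ k) p := by
  simp only [PySem.Int.powMod, PySem.Int.mod_eq_emod_of_pos hp]
  rw [← Int.mul_emod, ← mul_pow]

theorem pv_step (a b p : Int) (hp : 0 < p) (k : ℕ) :
    PySem.Int.mod (PySem.Int.mod ((a * b) ^ k) p * PySem.Int.mod (a * b) p) p
      = PySem.Int.mod ((a * b) ^ (k + 1)) p := by
  simp only [PySem.Int.mod_eq_emod_of_pos hp]
  rw [← Int.mul_emod, ← pow_succ]

theorem pv_Aloop_nohit (a b p : Int) (hp : 0 < p)
    (H : ∀ k : ℕ, 1 ≤ k → ¬ p ∣ (a * b) ^ k) :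
    ∀ (len lo : ℕ), 1 ≤ lo →
      pvALoop a b p len (lo : Int) ((lo : Int) - 1)
        = (lo : Int) - 1 + len := by
  intro len
  induction len with
  | zero => intro lo _; simp [pvALoop]
  | succ n ih =>
    intro lo hlo
    rw [pvALoop]
    simp only [Int.toNat_natCast, pv_cond_A a b p hp lo]
    rw [if_neg (by rw [PySem.Int.mod_eq_zero_iff_dvd]; exact H lo hlo)]
    have := ih (lo + 1) (by omega)
    push_cast at this ⊢
    rw [show (lo:Int) - 1 + 1 = (lo:Int) + 1 - 1 by ring, this]
    ring

theorem pv_Aloop_hit (a b p : Int) (hp : 0 < p) (k0 : ℕ)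
    (hk0 : p ∣ (a * b) ^ k0) (hmin : ∀ k : ℕ, 1 ≤ k → k < k0 → ¬ p ∣ (a * b) ^ k) :
    ∀ (len lo : ℕ), 1 ≤ lo → lo ≤ k0 → k0 < lo + len →
      pvALoop a b p len (lo : Int) ((lo : Int) - 1)
        = (k0 : Int) := by
  intro len
  induction len with
  | zero => intro lo _ h1 h2; omega
  | succ n ih =>
    intro lo hlo hlok0 hk0len
    rw [pvALoop]
    simp only [Int.toNat_natCast, pv_cond_A a b p hp lo]
    by_cases h : lo = k0
    · subst h
      rw [if_pos (by rw [PySem.Int.mod_eq_zero_iff_dvd]; exact hk0)]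
      ring
    · rw [if_neg (by rw [PySem.Int.mod_eq_zero_iff_dvd]; exact hmin lo hlo (by omega))]
      have := ih (lo + 1) (by omega) (by omega) (by omega)
      push_cast at this ⊢
      rw [show (lo:Int) - 1 + 1 = (lo:Int) + 1 - 1 by ring]
      exact this

theorem pv_Bloop_nohit (a b p : Int) (hp : 0 < p) (cap : ℕ)
    (H : ∀ k : ℕ, 1 ≤ k → ¬ p ∣ (a * b) ^ k) :
    ∀ (fuel i : ℕ), 1 ≤ i → i ≤ cap → cap ≤ i + fuel →
      pvBLoop (PySem.Int.mod (a * b) p) p (cap : Int) fuel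
          (PySem.Int.mod ((a * b) ^ i) p) (i : Int)
        = (PySem.Int.mod ((a * b) ^ cap) p, (cap : Int)) := by
  intro fuel
  induction fuel with
  | zero =>
    intro i h1 h2 h3
    have : i = cap := by omega
    subst this; rfl
  | succ n ih =>
    intro i h1 h2 h3
    rw [pvBLoop]
    by_cases hic : i = cap
    · subst hic
      rw [if_neg (by push Not; intro h; omega)]
    · rw [if_pos ⟨by exact_mod_cast (by omega : (i:ℤ) < cap), by
        rw [Ne, PySem.Int.mod_eq_zero_iff_dvd]; exact H i h1⟩]
      rw [pv_step a b p hp i]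
      have := ih (i + 1) (by omega) (by omega) (by omega)
      push_cast at this ⊢
      exact this

theorem pv_Bloop_hit (a b p : Int) (hp : 0 < p) (cap k0 : ℕ)
    (hk0 : p ∣ (a * b) ^ k0) (hmin : ∀ k : ℕ, 1 ≤ k → k < k0 → ¬ p ∣ (a * b) ^ k)
    (hcap : k0 ≤ cap) :
    ∀ (fuel i : ℕ), 1 ≤ i → i ≤ k0 → cap ≤ i + fuel →
      pvBLoop (PySem.Int.mod (a * b) p) p (cap : Int) fuel
          (PySem.Int.mod ((a * b) ^ i) p) (i : Int)
        = (0, (k0 : Int)) := by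
  intro fuel
  induction fuel with
  | zero =>
    intro i h1 h2 h3
    have : i = k0 := by omega
    subst this
    rw [pvBLoop, (PySem.Int.mod_eq_zero_iff_dvd _ _).mpr hk0]
  | succ n ih =>
    intro i h1 h2 h3
    by_cases hik : i = k0
    · subst hik
      rw [pvBLoop, if_neg (by push Not; intro _; simp [(PySem.Int.mod_eq_zero_iff_dvd _ _).mpr hk0]),
        (PySem.Int.mod_eq_zero_iff_dvd _ _).mpr hk0]
    · rw [pvBLoop]
      rw [if_pos ⟨by exact_mod_cast (by omega : (i:ℤ) < cap), by
        rw [Ne, PySem.Int.mod_eq_zero_iff_dvd]; exact hmin i h1 (by omega)⟩]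
      rw [pv_step a b p hp i]
      have := ih (i + 1) (by omega) (by omega) (by omega)
      push_cast at this ⊢
      exact this

theorem pv_main (a b p : Int) : elliptic_curve_order a b p = elliptic_curve_order_alt a b p := by
  by_cases hp : p ≤ 1
  · rw [elliptic_curve_order, elliptic_curve_order_alt, if_pos hp,
      show (p - 1).toNat = 0 by omega, pvALoop]
  · have hp2 : 2 ≤ p := by omega
    have hp0 : 0 < p := by omega
    have habs : ((p.natAbs : ℕ) : ℤ) = p := Int.natAbs_of_nonneg (le_of_lt hp0)
    set cap : ℕ := PySem.Int.bitLength p with hcapdef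
    have hltcap : p.natAbs < 2 ^ cap := PySem.Int.lt_two_pow_bitLength p
    have hcap1 : 1 ≤ cap := by
      rcases Nat.eq_zero_or_pos cap with h | h
      · rw [h] at hltcap; simp at hltcap; omega
      · exact h
    have hpcap : p ≤ 2 ^ cap := by
      have : ((p.natAbs : ℕ) : ℤ) < ((2 ^ cap : ℕ) : ℤ) := by exact_mod_cast hltcap
      rw [habs] at this
      push_cast at this
      omega
    have hlen1 : 1 ≤ (p - 1).toNat := by omega
    have hpn1 : p ≤ 2 ^ ((p - 1).toNat) := by
      have h1 : (p - 1).toNat < 2 ^ (p - 1).toNat := Nat.lt_two_pow_self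
      have h2 : ((p - 1).toNat : ℤ) < ((2 ^ (p - 1).toNat : ℕ) : ℤ) := by exact_mod_cast h1
      push_cast at h2
      omega
    rw [elliptic_curve_order, elliptic_curve_order_alt, if_neg hp]
    by_cases hm : PySem.Int.mod (a * b) p = 0
    · simp only [hm]
      have hd1 : p ∣ (a * b) ^ 1 := by
        rw [pow_one]; exact (PySem.Int.mod_eq_zero_iff_dvd _ _).mp hm
      have := pv_Aloop_hit a b p hp0 1 hd1 (by omega) (p - 1).toNat 1 le_rfl le_rfl (by omega)
      simpa using this
    · simp only [if_neg hm]
      by_cases hex : ∃ k : ℕ, 1 ≤ k ∧ p ∣ (a * b) ^ k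
      · have hk0spec := Nat.find_spec hex
        set k0 : ℕ := Nat.find hex with hk0def
        have hmin : ∀ k : ℕ, 1 ≤ k → k < k0 → ¬ p ∣ (a * b) ^ k := by
          intro k hk1 hklt hdvd
          exact Nat.find_min hex hklt ⟨hk1, hdvd⟩
        have hcapdvd : p ∣ (a * b) ^ cap :=
          pv_pow_dvd_of_pow_dvd_int a b p cap k0 hp2 hk0spec.1 hcap1 hpcap hk0spec.2
        have hk0cap : k0 ≤ cap := Nat.find_min' hex ⟨hcap1, hcapdvd⟩
        have hpm1dvd : p ∣ (a * b) ^ ((p - 1).toNat) :=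
          pv_pow_dvd_of_pow_dvd_int a b p _ k0 hp2 hk0spec.1 hlen1 hpn1 hk0spec.2
        have hk0pm1 : k0 ≤ (p - 1).toNat := Nat.find_min' hex ⟨hlen1, hpm1dvd⟩
        have hA := pv_Aloop_hit a b p hp0 k0 hk0spec.2 hmin (p - 1).toNat 1
          le_rfl hk0spec.1 (by omega)
        have hB := pv_Bloop_hit a b p hp0 cap k0 hk0spec.2 hmin hk0cap cap 1
          le_rfl hk0spec.1 (by omega)
        rw [pow_one] at hB
        push_cast at hB
        rw [← hcapdef]
        simp only [hB]
        simpa using hA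
      · push Not at hex
        have H : ∀ k : ℕ, 1 ≤ k → ¬ p ∣ (a * b) ^ k := hex
        have hA := pv_Aloop_nohit a b p hp0 H (p - 1).toNat 1 le_rfl
        have hB := pv_Bloop_nohit a b p hp0 cap H cap 1 le_rfl hcap1 (by omega)
        rw [pow_one] at hB
        push_cast at hB
        rw [← hcapdef]
        simp only [hB]
        rw [if_neg (fun h => H cap hcap1 ((PySem.Int.mod_eq_zero_iff_dvd _ _).mp h))]
        norm_num at hA
        rw [show (p - 1).toNat = p.toNat - 1 by omega, hA]
        omega

-- ===== VERDICT (by name: the statement is the Claim_ definition above) =====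
theorem elliptic_curve_order_spec : Claim_equal_elliptic_curve_order := by
  intro a b p _
  unfold Spec_elliptic_curve_order
  exact pv_main a b p
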